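/- GENERATED by mk_final_copies.py from the proof of the farm's unit `start_decoder.R9` (farm:start_decoder.R9.2: Proof.lean) as the
   re-elaboration sweep compiled it — do not edit. -/
/-
  start_decoder.R9 (0x116105 – 0x116231, 0x116387 – 0x116394; stb_vorbis_fixed.c 4096 – 4109, 4118): `m = mapping + i`,
  `mapping_type`, `chan = setup_malloc(3·C)`, `submaps`, `max_submaps`, `coupling_steps`.

  The segment has nine calls of contract functions (get_bits ×5, setup_malloc, error ×3). It is proved in SEVEN LEGS, one per
  returned callee state; between the legs the assertion `AtS` (Lemmas.lean: the memory-level carrier `Pt` of the mapping loop's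
  invariant + the registers + what the record under construction has so far) is handed over. Every leg: the 30-line prelude
  (the numbers of the frame, `rbp = fw`, `rbx = mw` as rewrite rules of the walker), ONE walk, the check goals through
  `Pt.site_rec` / `Pt.objLive`, the callees' preconditions through `Pt.readerPre / errorPre / arenaPre` at the memory that
  `Pt.write` carries the point to, and after the return `Pt.after_get_bits / after_error / after_malloc(_fail)`.
-/
import Asan.CheckWalk
import Vorbis.Spec.Units.start_decoder_R9
import Vorbis.Spec.Worked.start_decoder_R9_Lemmas

open X86 X86.User Asan Vorbis Vorbis.Spec Vorbis.Spec.StartDecoder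

set_option maxRecDepth 4000
set_option maxHeartbeats 4000000

namespace Vorbis.Spec.start_decoder_R9

/-- `rbx = m`: the address arithmetic of `Mapping *m = f->mapping + i` (`movsxd ; imul 56 ; add`). -/
theorem rbx_eq (i M : Nat) (hi : i < 64) (hM : M + 56 * 64 < 2 ^ 64) :
    Word.ofBV (BitVec.signExtend 64 (BitVec.ofNat 32 i)) * 56 + UInt64.ofNat M = addr (M + 56 * i) := by
  have hx : (Word.ofBV (BitVec.signExtend 64 (BitVec.ofNat 32 i))).toNat = i := by
    rw [toNat_sext32 _ (by simp only [BitVec.toNat_ofNat]; omega)]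
    simp only [BitVec.toNat_ofNat]
    omega
  generalize Word.ofBV (BitVec.signExtend 64 (BitVec.ofNat 32 i)) = x at hx
  apply eq_addr
  u_omega

/-- **Leg 0** (0x116105 … the return of `get_bits(f, 16)` at 0x11612e): the load8 check of `f->mapping`, `rbx = m = mapping + 56·i`,
the call. From the segment's entry assertion to `AtS … cut280 1`. -/
theorem leg0 (Lay : Layout) (hLay : Lay.hi = 0x1000000) (μ : Microarch) (hμ : UserX.MicroOK μ) (u₀ : State)
    (hcode : HasCodeNat Lay u₀ Vorbis.L.start_decoder.entry Vorbis.Code.code_start_decoder.nat Vorbis.L.start_decoder.size)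
    (hload8 : Asan.SmallCheck Lay μ Vorbis.WayInv (Vorbis.CodeOK u₀) [.rax, .rcx, .rdx] 8 Vorbis.L.__asan_load8_noabort.entry)
    (hgb : ∀ (others : List Obj) (frames : List (Nat × FrameLayout)) (Blk : Block → Prop) (len : Nat),
      Calls Lay μ Vorbis.WayInv (Vorbis.conv u₀) Vorbis.L.get_bits.entry (Vorbis.Spec.get_bits.spec others frames Blk len))
    (g : Ghost) (i : Nat) (v : State) (hat : AtR9 u₀ g i v) :
    ReachVia Lay μ WayInv v (fun w => AtS u₀ g i Vorbis.L.start_decoder.cut280 1 w) := by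
  obtain ⟨A7, A7c, A, hb⟩ := hat
  have hpt := Pt.of_body hb
  generalize hmm : mapAt g v.mem i = m at hpt
  have hgb' := hgb A.2 g.frames' (g.Blk A) g.len
  obtain ⟨r1, r8, r2, r3⟩ := hpt.nums
  obtain ⟨f1, f2, f3⟩ := hpt.where_f
  have hG := hpt.geo
  have hrsp0 := hb.loop.frame.rsp
  have hR : (v.reg .rsp).toNat = g.R := by
    rw [hrsp0, toNat_addr _ (by omega)]
  have hstk : Lay.Has (v.reg .rsp - 408) 1896 := by
    unfold Layout.Has Layout.lo
    rw [hLay]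
    u_omega
  obtain ⟨fw, hfw⟩ : ∃ fw : Word, fw = addr g.f := ⟨_, rfl⟩
  have hfn : fw.toNat = g.f := by
    rw [hfw, toNat_addr _ (by omega)]
  have w_rip := hb.loop.frame.rip
  have hrbp : v.reg .rbp = fw := by
    rw [hfw]
    exact hb.loop.rbp
  have w_eq : Mem.EqOn Vorbis.L.textLo Vorbis.L.textHi u₀.mem v.mem := hb.loop.frame.code
  have hdf : v.flags .df = false := (show abiInv _ from hb.loop.frame.inv).1
  have hmx : v.mxcsr &&& 0x1F80 = 0x1F80 := (show abiInv _ from hb.loop.frame.inv).2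
  have hsse := Vorbis.sseOK_of_abiInv hb.loop.frame.inv
  have ld1 : v.mem.readLE (addr g.R + 16) 4 = i := by
    have := hpt.cnt
    simp only [vfield]
    exact this
  have ld2 : v.mem.readLE (fw + 472) 8 = stb_vorbis.mapping v.mem g.f := by
    rw [hfw]
    simp only [vfield, vacc, voff]
  have hi64 : i < 64 := by
    have h1 := hpt.maps.MP1
    have h2 := hpt.lt
    omega
  clear hb
  u_walk hcode [hμ.vendor] span [Vorbis.L.textLo, Vorbis.L.textHi] side (v_side)
  case check_11610c =>
    have hun : ShadowUntouched v.mem s_11610c.mem := by v_untouched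
    exact hpt.objLive.accSmall hpt.shadow hun _ 8 (by decide) (by u_omega) (by simp only [Off.sizeof.stb_vorbis]; u_omega)
  case call_inv => v_inv
  case pre_116129 =>
    have hs : Mem.SameExcept [⟨(v.reg .rsp).toNat - 8, (v.reg .rsp).toNat⟩] v.mem s_116129.mem := by u_same
    have hpt_s : Pt u₀ g i A7 A7c A.1 A m s_116129.mem := by
      apply hpt.carry_own hs
      intro w hw
      have e : w = ⟨(v.reg .rsp).toNat - 8, (v.reg .rsp).toNat⟩ := List.mem_singleton.mp hw
      subst e
      left
      simp only []
      omega
    refine ⟨hpt_s.readerPre (by rw [w_rsp]; u_omega) (by rw [w_rdi]; exact hfn), ?_⟩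
    rw [bitsArg_def, w_rsi]
    decide
  case cont =>
    v_after_call w_rsp_116129 w_mem_116129
    have c_rdi : (s_116129.reg .rdi).toNat = g.f := by
      rw [w_rdi_116129]
      exact hfn
    have c_sp : (addr g.R - 8).toNat = g.R - 8 := by u_omega
    simp only [c_rdi, c_sp] at w_same
    have hs : Mem.SameExcept [⟨g.R - 8, g.R⟩] v.mem (v.mem.writeLE (addr g.R - 8) 8 1138990) := by
      apply Mem.SameExcept.writeLE
      · u_omega
      · exact ⟨_, List.mem_cons_self, by simp only []; u_omega, by simp only []; u_omega⟩
    have hpt_s : Pt u₀ g i A7 A7c A.1 A m (v.mem.writeLE (addr g.R - 8) 8 1138990) := by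
      apply hpt.carry_own hs
      intro w hw
      have e : w = ⟨g.R - 8, g.R⟩ := List.mem_singleton.mp hw
      subst e
      left
      simp only []
      omega
    have hpost : GetBitsSpecPost (g.Blk A) g.len (s_116129.reg .rdi).toNat (bitsArg s_116129) s_116129 s_116129r := w_post
    have hun := hpost.untouched
    have hbits := hpost.bits.bits
    rw [w_mem_116129] at hun
    rw [c_rdi] at hbits
    obtain ⟨hpt_r, hkept, hnc⟩ := hpt_s.after_get_bits (sp := g.R - 8) (by omega) (by omega) w_same hun hbits
    refine ReachVia.done ⟨A7, A7c, A.1, A, m, ?_⟩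
    have hM : stb_vorbis.mapping v.mem g.f + 56 * 64 < 2 ^ 64 := by
      have := Mem.u64_lt v.mem (g.f + 472)
      have hm1 := hG.m1
      have hm2 := hG.m2
      have ha2 := hG.a2
      have e : m = stb_vorbis.mapping v.mem g.f + 56 * i := by
        rw [← hmm]
        simp only [mapAt, stb_vorbis.mapping_at, Off.sizeof.Mapping]
      omega
    exact
      { pt := hpt_r
        rip := w_rip
        rsp := w_rsp
        inv := w_inv
        rbp := by
          rw [w_kept .rbp (by decide), hrbp, hfw]
        rbx := by
          rw [w_rbx, rbx_eq i _ hi64 hM, ← hmm]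
          simp only [mapAt, stb_vorbis.mapping_at, Off.sizeof.Mapping]
        ai := fun _ => rfl
        alloc := fun h => absurd h (by decide)
        mp2 := fun h => absurd h (by decide)
        mp3 := fun h => absurd h (by decide)
        small4 := fun h => absurd h (by decide)
        small8 := fun h => absurd h (by decide) }

/-- **Leg 1** (0x11612e … the return of `setup_malloc` at 0x116159): `mapping_type != 0` → `error` → the epilogue; else the load4
check of `f->channels`, `setup_malloc(f, 3·channels)`; both outcomes of the allocator give `AtS … cut282 2`. -/
theorem leg1 (Lay : Layout) (hLay : Lay.hi = 0x1000000) (μ : Microarch) (hμ : UserX.MicroOK μ) (u₀ : State)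
    (hcode : HasCodeNat Lay u₀ Vorbis.L.start_decoder.entry Vorbis.Code.code_start_decoder.nat Vorbis.L.start_decoder.size)
    (herr : ∀ (others : List Obj) (frames : List (Nat × FrameLayout)),
      Calls Lay μ Vorbis.WayInv (Vorbis.conv u₀) Vorbis.L.error.entry (Vorbis.Spec.error.spec others frames))
    (hload4 : Asan.SmallCheck Lay μ Vorbis.WayInv (Vorbis.CodeOK u₀) [.rax, .rcx, .rdx] 4 Vorbis.L.__asan_load4_noabort.entry)
    (hsm : ∀ (others : List Obj) (frames : List (Nat × FrameLayout)) (A : Arena),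
      Calls Lay μ Vorbis.WayInv (Vorbis.conv u₀) Vorbis.L.setup_malloc.entry (Vorbis.Spec.setup_malloc.spec others frames A))
    (g : Ghost) (i : Nat) (v : State) (hat : AtS u₀ g i Vorbis.L.start_decoder.cut280 1 v) :
    ReachVia Lay μ WayInv v (fun w => AtS u₀ g i Vorbis.L.start_decoder.cut282 2 w ∨ AtERR u₀ g w) := by
  obtain ⟨A7, A7c, Ai, A, m, hst⟩ := hat
  have hpt := hst.pt
  obtain ⟨r1, r8, r2, r3⟩ := hpt.nums
  obtain ⟨f1, f2, f3⟩ := hpt.where_f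
  have hG := hpt.geo
  have hrsp0 := hst.rsp
  have hR : (v.reg .rsp).toNat = g.R := by
    rw [hrsp0, toNat_addr _ (by omega)]
  have hstk : Lay.Has (v.reg .rsp - 408) 1896 := by
    unfold Layout.Has Layout.lo
    rw [hLay]
    u_omega
  obtain ⟨fw, hfw⟩ : ∃ fw : Word, fw = addr g.f := ⟨_, rfl⟩
  have hfn : fw.toNat = g.f := by
    rw [hfw, toNat_addr _ (by omega)]
  obtain ⟨mw, hmw⟩ : ∃ mw : Word, mw = addr m := ⟨_, rfl⟩
  have hmn : mw.toNat = m := by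
    have := hG.m2
    have := hG.a2
    rw [hmw, toNat_addr _ (by omega)]
  have w_rip := hst.rip
  have hrbp : v.reg .rbp = fw := by
    rw [hfw]
    exact hst.rbp
  have hrbx : v.reg .rbx = mw := by
    rw [hmw]
    exact hst.rbx
  have w_eq : Mem.EqOn Vorbis.L.textLo Vorbis.L.textHi u₀.mem v.mem := hpt.code
  have hdf : v.flags .df = false := (show abiInv _ from hst.inv).1
  have hmx : v.mxcsr &&& 0x1F80 = 0x1F80 := (show abiInv _ from hst.inv).2
  have hsse := Vorbis.sseOK_of_abiInv hst.inv
  have herr' := herr A.2 g.frames'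
  have hsm' := hsm A.2 g.frames' A.1
  obtain ⟨C, hC⟩ : ∃ C : Nat, nchan v.mem g.f = C := ⟨_, rfl⟩
  have hC16 : 1 ≤ C ∧ C ≤ 16 := by
    have := hpt.mid.header.HD1
    rw [← hC, nchan_def]
    omega
  have ld4 : v.mem.readLE (fw + 4) 4 = C := by
    have h1 := hpt.mid.header.HD1
    rw [hfw, ← hC, nchan_def]
    simp only [vfield]
    have := Mem.u32_of_i32_nonneg v.mem (g.f + 4) (by simp only [vacc, voff] at h1; omega)
    rw [this]
    simp only [vacc, voff]
  u_walk hcode [hμ.vendor] until [Vorbis.L.start_decoder.cut4] span [Vorbis.L.textLo, Vorbis.L.textHi] side (v_side)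
  case check_116148 =>
    have hun : ShadowUntouched v.mem s_116148.mem := by v_untouched
    exact hpt.objLive.accSmall hpt.shadow hun _ 4 (by decide) (by u_omega) (by simp only [Off.sizeof.stb_vorbis]; u_omega)
  case call_inv => v_inv
  case call_inv => v_inv
  case pre_116154 =>
    have hpt_s : Pt u₀ g i A7 A7c Ai A m s_116154.mem := by
      rw [w_mem]
      exact hpt.write _ 8 _ (Or.inl (by u_omega))
    exact hpt_s.arenaPre (by rw [w_rsp]; u_omega) (by rw [w_rdi]; exact hfn)
  case pre_11613a =>
    have hpt_s : Pt u₀ g i A7 A7c Ai A m s_11613a.mem := by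
      rw [w_mem]
      exact hpt.write _ 8 _ (Or.inl (by u_omega))
    exact hpt_s.errorPre (by rw [w_rsp]; u_omega) (by rw [w_rdi]; exact hfn)
  case cont =>
    v_after_call w_rsp_116154 w_mem_116154
    have c_rdi : (s_116154.reg .rdi).toNat = g.f := by
      rw [w_rdi_116154]
      exact hfn
    have c_sp : (addr g.R - 8).toNat = g.R - 8 := by u_omega
    have c_rsp : (s_116154.reg .rsp).toNat + 8 = g.R := by
      rw [w_rsp_116154]
      u_omega
    have hn : (s_116154.reg .rsi).toNat % 2 ^ 32 = 3 * C := by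
      rw [w_rsi_116154, Vorbis.toNat_ofBV32, BitVec.toNat_mul, BitVec.toNat_ofNat]
      simp only [BitVec.toNat_ofNat]
      omega
    simp only [c_rdi, c_sp, hn] at w_same
    have hw0 : (g.RA - 1888 ≤ (addr g.R - 8).toNat ∧ (addr g.R - 8).toNat + 8 ≤ g.R + 8) ∨
        (m ≤ (addr g.R - 8).toNat ∧ (addr g.R - 8).toNat + 8 ≤ m + 56) := Or.inl (by u_omega)
    have hpt_s : Pt u₀ g i A7 A7c Ai A m (v.mem.writeLE (addr g.R - 8) 8 1139033) := hpt.write _ 8 _ hw0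
    have hnc0 : nchan (v.mem.writeLE (addr g.R - 8) 8 1139033) g.f = C := by
      rw [nchan_write hG _ _ 8 _ hw0]
      exact hC
    have hp : (A.1.Fits ((s_116154.reg .rsi).toNat % 2 ^ 32) →
          (s_116154r.reg .rax).toNat = A.1.B + A.1.S + 32 ∧
          ArenaOK (A.1.pushSetup ((s_116154.reg .rsi).toNat % 2 ^ 32))
            (A.1.newSetupObj ((s_116154.reg .rsi).toNat % 2 ^ 32) :: A.2) s_116154r.mem (s_116154.reg .rdi).toNat ∧
          ShadowInv (A.1.newSetupObj ((s_116154.reg .rsi).toNat % 2 ^ 32) :: A.2) g.frames'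
            ((s_116154.reg .rsp).toNat + 8) s_116154r.mem) ∧
        (¬ A.1.Fits ((s_116154.reg .rsi).toNat % 2 ^ 32) →
          s_116154r.reg .rax = 0 ∧ ArenaOK A.1 A.2 s_116154r.mem (s_116154.reg .rdi).toNat ∧
          ShadowUntouched s_116154.mem s_116154r.mem ∧
          Mem.SameExcept
            [⟨(s_116154.reg .rsp).toNat - 80, (s_116154.reg .rsp).toNat⟩,
             ⟨(s_116154.reg .rdi).toNat + 8, (s_116154.reg .rdi).toNat + 12⟩] s_116154.mem s_116154r.mem) := w_post
    rw [hn, c_rdi, c_rsp, w_mem_116154] at hp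
    have hai := hst.ai (by omega)
    subst hai
    have hrbp' : s_116154r.reg .rbp = addr g.f := by
      rw [w_kept .rbp (by decide), hrbp, hfw]
    have hrbx' : s_116154r.reg .rbx = addr m := by
      rw [w_kept .rbx (by decide), hrbx, hmw]
    by_cases hfit : A.1.Fits (3 * C)
    · obtain ⟨hrax, harena', hsh'⟩ := hp.1 hfit
      obtain ⟨hpt_r, hnc⟩ := hpt_s.after_malloc (3 * C) (sp := g.R - 8) (by omega) (by omega) w_same hfit harena' hsh'
      refine ReachVia.done (Or.inl ⟨A7, A7c, A.1, (A.1.pushSetup (3 * C), A.1.newSetupObj (3 * C) :: A.2), m, ?_⟩)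
      exact
        { pt := hpt_r
          rip := w_rip
          rsp := w_rsp
          inv := w_inv
          rbp := hrbp'
          rbx := hrbx'
          ai := fun h => absurd h (by decide)
          alloc := by
            intro _
            right
            refine ⟨by omega, ?_⟩
            rw [hrax, hnc, hnc0]
            have := hpt.mid.arena.since_pushSetup (3 * C)
            simp only [Off.sizeof.MappingChannel]
            rw [Nat.add_assoc]
            exact this
          mp2 := fun h => absurd h (by decide)
          mp3 := fun h => absurd h (by decide)
          small4 := fun h => absurd h (by decide)
          small8 := fun h => absurd h (by decide) }
    · -- the failure clause's last conjunct (the footprint of a refused request) is not needed here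
      obtain ⟨hrax, harena', hun, _⟩ := hp.2 hfit
      obtain ⟨hpt_r, hnc⟩ := hpt_s.after_malloc_fail (3 * C) (by omega) (sp := g.R - 8) (by omega) (by omega) w_same harena' hun
      refine ReachVia.done (Or.inl ⟨A7, A7c, A.1, A, m, ?_⟩)
      exact
        { pt := hpt_r
          rip := w_rip
          rsp := w_rsp
          inv := w_inv
          rbp := hrbp'
          rbx := hrbx'
          ai := fun h => absurd h (by decide)
          alloc := fun _ => Or.inl hrax
          mp2 := fun h => absurd h (by decide)
          mp3 := fun h => absurd h (by decide)
          small4 := fun h => absurd h (by decide)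
          small8 := fun h => absurd h (by decide) }
  case cont =>
    v_after_call w_rsp_11613a w_mem_11613a
    have c_rdi : (s_11613a.reg .rdi).toNat = g.f := by
      rw [w_rdi_11613a]
      exact hfn
    have c_sp : (addr g.R - 8).toNat = g.R - 8 := by u_omega
    simp only [c_rdi, c_sp] at w_same
    have hpt_s : Pt u₀ g i A7 A7c Ai A m (v.mem.writeLE (addr g.R - 8) 8 1139007) :=
      hpt.write _ 8 _ (Or.inl (by u_omega))
    obtain ⟨hrax, hun, _⟩ := w_post
    rw [w_mem_11613a] at hun
    have hpt_r := hpt_s.after_error (sp := g.R - 8) (by omega) (by omega) w_same hun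
    have h_rsp := w_rsp
    u_walk hcode [hμ.vendor] until [Vorbis.L.start_decoder.cut4] span [Vorbis.L.textLo, Vorbis.L.textHi] side (v_side)
    refine ReachVia.done (Or.inr (St.toERR (by rw [w_mem]; exact hpt_r) w_rip w_rsp (by v_inv) w_rax))

/-- **Leg 2** (0x116159 … the return of the first `get_bits(f, 1)` at 0x11618d): the store8 check and the store of `m->chan`;
NULL → `error` → the epilogue; else MP2 and the call. -/
theorem leg2 (Lay : Layout) (hLay : Lay.hi = 0x1000000) (μ : Microarch) (hμ : UserX.MicroOK μ) (u₀ : State)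
    (hcode : HasCodeNat Lay u₀ Vorbis.L.start_decoder.entry Vorbis.Code.code_start_decoder.nat Vorbis.L.start_decoder.size)
    (hgb : ∀ (others : List Obj) (frames : List (Nat × FrameLayout)) (Blk : Block → Prop) (len : Nat),
      Calls Lay μ Vorbis.WayInv (Vorbis.conv u₀) Vorbis.L.get_bits.entry (Vorbis.Spec.get_bits.spec others frames Blk len))
    (herr : ∀ (others : List Obj) (frames : List (Nat × FrameLayout)),
      Calls Lay μ Vorbis.WayInv (Vorbis.conv u₀) Vorbis.L.error.entry (Vorbis.Spec.error.spec others frames))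
    (hstore8 : Asan.SmallCheck Lay μ Vorbis.WayInv (Vorbis.CodeOK u₀) [.rax, .rcx, .rdx] 8 Vorbis.L.__asan_store8_noabort.entry)
    (g : Ghost) (i : Nat) (v : State) (hat : AtS u₀ g i Vorbis.L.start_decoder.cut282 2 v) :
    ReachVia Lay μ WayInv v (fun w => AtS u₀ g i Vorbis.L.start_decoder.cut284 3 w ∨ AtERR u₀ g w) := by
  obtain ⟨A7, A7c, Ai, A, m, hst⟩ := hat
  have hpt := hst.pt
  obtain ⟨r1, r8, r2, r3⟩ := hpt.nums
  obtain ⟨f1, f2, f3⟩ := hpt.where_f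
  have hG := hpt.geo
  have hrsp0 := hst.rsp
  have hR : (v.reg .rsp).toNat = g.R := by
    rw [hrsp0, toNat_addr _ (by omega)]
  have hstk : Lay.Has (v.reg .rsp - 408) 1896 := by
    unfold Layout.Has Layout.lo
    rw [hLay]
    u_omega
  obtain ⟨fw, hfw⟩ : ∃ fw : Word, fw = addr g.f := ⟨_, rfl⟩
  have hfn : fw.toNat = g.f := by
    rw [hfw, toNat_addr _ (by omega)]
  obtain ⟨mw, hmw⟩ : ∃ mw : Word, mw = addr m := ⟨_, rfl⟩
  have hmn : mw.toNat = m := by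
    have := hG.m2
    have := hG.a2
    rw [hmw, toNat_addr _ (by omega)]
  have w_rip := hst.rip
  have hrbp : v.reg .rbp = fw := by
    rw [hfw]
    exact hst.rbp
  have hrbx : v.reg .rbx = mw := by
    rw [hmw]
    exact hst.rbx
  have w_eq : Mem.EqOn Vorbis.L.textLo Vorbis.L.textHi u₀.mem v.mem := hpt.code
  have hdf : v.flags .df = false := (show abiInv _ from hst.inv).1
  have hmx : v.mxcsr &&& 0x1F80 = 0x1F80 := (show abiInv _ from hst.inv).2
  have hsse := Vorbis.sseOK_of_abiInv hst.inv
  have herr' := herr A.2 g.frames'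
  have hgb' := hgb A.2 g.frames' (g.Blk A) g.len
  have hm1 := hG.m1
  have hm2 := hG.m2
  have ha1 := hG.a1
  have ha2 := hG.a2
  obtain ⟨z, hrax⟩ : ∃ z : Word, v.reg .rax = z := ⟨_, rfl⟩
  have halloc := hst.alloc rfl
  rw [hrax] at halloc
  obtain ⟨C, hC⟩ : ∃ C : Nat, nchan v.mem g.f = C := ⟨_, rfl⟩
  rw [hC] at halloc
  -- the three stores of the segment before its calls: two pushes, `m->chan = …`
  have hwS : (g.RA - 1888 ≤ (addr g.R - 8).toNat ∧ (addr g.R - 8).toNat + 8 ≤ g.R + 8) ∨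
      (m ≤ (addr g.R - 8).toNat ∧ (addr g.R - 8).toNat + 8 ≤ m + 56) := Or.inl (by u_omega)
  have hwR : (g.RA - 1888 ≤ (mw + 8).toNat ∧ (mw + 8).toNat + 8 ≤ g.R + 8) ∨
      (m ≤ (mw + 8).toNat ∧ (mw + 8).toNat + 8 ≤ m + 56) := Or.inr (by u_omega)
  have hpt3 : ∀ x1 x2 x3 : Nat, Pt u₀ g i A7 A7c Ai A m
      (((v.mem.writeLE (addr g.R - 8) 8 x1).writeLE (mw + 8) 8 x2).writeLE (addr g.R - 8) 8 x3) :=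
    fun x1 x2 x3 => ((hpt.write _ 8 x1 hwS).write _ 8 x2 hwR).write _ 8 x3 hwS
  have hnc3 : ∀ x1 x2 x3 : Nat, nchan
      (((v.mem.writeLE (addr g.R - 8) 8 x1).writeLE (mw + 8) 8 x2).writeLE (addr g.R - 8) 8 x3) g.f = C := by
    intro x1 x2 x3
    rw [nchan_write hG _ _ 8 _ hwS, nchan_write hG _ _ 8 _ hwR, nchan_write hG _ _ 8 _ hwS]
    exact hC
  have hch3 : ∀ x1 x2 x3 : Nat, x2 < 2 ^ 64 → Mem.u64
      (((v.mem.writeLE (addr g.R - 8) 8 x1).writeLE (mw + 8) 8 x2).writeLE (addr g.R - 8) 8 x3) (m + 8) = x2 := by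
    intro x1 x2 x3 hx2
    have ha3 := hG.a3
    have e : mw + 8 = addr (m + 8) := by
      rw [hmw]
      simp only [vfield]
    rw [Mem.u64_writeLE _ _ _ _ _ (by u_omega) (by omega) (by u_omega), e, Mem.u64_writeLE_same]
    omega
  u_walk hcode [hμ.vendor] until [Vorbis.L.start_decoder.cut4] span [Vorbis.L.textLo, Vorbis.L.textHi] side (v_side)
  case check_116160 =>
    have hun : ShadowUntouched v.mem s_116160.mem := by v_untouched
    exact check_site hpt.shadow hun (hpt.site_rec 8 8 (by omega) (by omega)) (by u_omega)
  case call_inv => v_inv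
  case call_inv => v_inv
  case pre_116188 =>
    have hpt_s : Pt u₀ g i A7 A7c Ai A m s_116188.mem := by
      rw [w_mem]
      exact hpt3 _ _ _
    refine ⟨hpt_s.readerPre (by rw [w_rsp]; u_omega) (by rw [w_rdi]; exact hfn), ?_⟩
    rw [bitsArg_def, w_rsi]
    decide
  case pre_116176 =>
    have hpt_s : Pt u₀ g i A7 A7c Ai A m s_116176.mem := by
      rw [w_mem]
      exact hpt3 _ _ _
    exact hpt_s.errorPre (by rw [w_rsp]; u_omega) (by rw [w_rdi]; exact hfn)
  case cont =>
    v_after_call w_rsp_116188 w_mem_116188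
    have c_rdi : (s_116188.reg .rdi).toNat = g.f := by
      rw [w_rdi_116188]
      exact hfn
    have c_sp : (addr g.R - 8).toNat = g.R - 8 := by u_omega
    simp only [c_rdi, c_sp] at w_same
    have hpost : GetBitsSpecPost (g.Blk A) g.len (s_116188.reg .rdi).toNat (bitsArg s_116188) s_116188 s_116188r := w_post
    have hun := hpost.untouched
    have hbits := hpost.bits.bits
    rw [w_mem_116188] at hun
    rw [c_rdi] at hbits
    obtain ⟨hpt_r, hkept, hnc⟩ := (hpt3 _ _ _).after_get_bits (sp := g.R - 8) (by omega) (by omega) w_same hun hbits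
    refine ReachVia.done (Or.inl ⟨A7, A7c, Ai, A, m, ?_⟩)
    have hz : z.toNat < 2 ^ 64 := z.toNat_lt
    exact
      { pt := hpt_r
        rip := w_rip
        rsp := w_rsp
        inv := w_inv
        rbp := by
          rw [w_kept .rbp (by decide), hrbp, hfw]
        rbx := by
          rw [w_kept .rbx (by decide), hrbx, hmw]
        ai := fun h => absurd h (by decide)
        alloc := fun h => absurd h (by decide)
        mp2 := by
          intro _
          have e : Mapping.chan s_116188r.mem m = z.toNat := by
            simp only [vacc, voff, Mem.ptr]
            rw [hkept.u64 (m + 8) (by simp only []; omega) (by simp only []; omega), hch3 _ _ _ hz]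
          rw [e, hnc, hnc3]
          rcases halloc with h0 | h1
          · rw [h0] at hbr_11616c
            exact absurd rfl hbr_11616c
          · exact h1.2
        mp3 := fun h => absurd h (by decide)
        small4 := fun h => absurd h (by decide)
        small8 := fun h => absurd h (by decide) }
  case cont =>
    v_after_call w_rsp_116176 w_mem_116176
    have c_rdi : (s_116176.reg .rdi).toNat = g.f := by
      rw [w_rdi_116176]
      exact hfn
    have c_sp : (addr g.R - 8).toNat = g.R - 8 := by u_omega
    simp only [c_rdi, c_sp] at w_same
    obtain ⟨hrax', hun, _⟩ := w_post
    rw [w_mem_116176] at hun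
    have hpt_r := (hpt3 _ _ _).after_error (sp := g.R - 8) (by omega) (by omega) w_same hun
    u_walk hcode [hμ.vendor] until [Vorbis.L.start_decoder.cut4] span [Vorbis.L.textLo, Vorbis.L.textHi] side (v_side)
    refine ReachVia.done (Or.inr (St.toERR (by rw [w_mem]; exact hpt_r) w_rip w_rsp (by v_inv) w_rax))

/-- **Leg 3** (0x11618d … 0x1161a2 or 0x1161d6): `get_bits(f, 1) != 0` → the call of `get_bits(f, 4)`; else `m->submaps = 1`
(0x116224), the load1 check, `max_submaps`, the call of the second `get_bits(f, 1)`. -/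
theorem leg3 (Lay : Layout) (hLay : Lay.hi = 0x1000000) (μ : Microarch) (hμ : UserX.MicroOK μ) (u₀ : State)
    (hcode : HasCodeNat Lay u₀ Vorbis.L.start_decoder.entry Vorbis.Code.code_start_decoder.nat Vorbis.L.start_decoder.size)
    (hgb : ∀ (others : List Obj) (frames : List (Nat × FrameLayout)) (Blk : Block → Prop) (len : Nat),
      Calls Lay μ Vorbis.WayInv (Vorbis.conv u₀) Vorbis.L.get_bits.entry (Vorbis.Spec.get_bits.spec others frames Blk len))
    (hstore1 : Asan.SmallCheck Lay μ Vorbis.WayInv (Vorbis.CodeOK u₀) [.rax, .rdx] 1 Vorbis.L.__asan_store1_noabort.entry)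
    (hload1 : Asan.SmallCheck Lay μ Vorbis.WayInv (Vorbis.CodeOK u₀) [.rax, .rdx] 1 Vorbis.L.__asan_load1_noabort.entry)
    (g : Ghost) (i : Nat) (v : State) (hat : AtS u₀ g i Vorbis.L.start_decoder.cut284 3 v) :
    ReachVia Lay μ WayInv v (fun w => AtS u₀ g i Vorbis.L.start_decoder.cut285 4 w ∨
      AtS u₀ g i Vorbis.L.start_decoder.cut286 5 w) := by
  obtain ⟨A7, A7c, Ai, A, m, hst⟩ := hat
  have hpt := hst.pt
  obtain ⟨r1, r8, r2, r3⟩ := hpt.nums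
  obtain ⟨f1, f2, f3⟩ := hpt.where_f
  have hG := hpt.geo
  have hrsp0 := hst.rsp
  have hR : (v.reg .rsp).toNat = g.R := by
    rw [hrsp0, toNat_addr _ (by omega)]
  have hstk : Lay.Has (v.reg .rsp - 408) 1896 := by
    unfold Layout.Has Layout.lo
    rw [hLay]
    u_omega
  obtain ⟨fw, hfw⟩ : ∃ fw : Word, fw = addr g.f := ⟨_, rfl⟩
  have hfn : fw.toNat = g.f := by
    rw [hfw, toNat_addr _ (by omega)]
  obtain ⟨mw, hmw⟩ : ∃ mw : Word, mw = addr m := ⟨_, rfl⟩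
  have hmn : mw.toNat = m := by
    have := hG.m2
    have := hG.a2
    rw [hmw, toNat_addr _ (by omega)]
  have w_rip := hst.rip
  have hrbp : v.reg .rbp = fw := by
    rw [hfw]
    exact hst.rbp
  have hrbx : v.reg .rbx = mw := by
    rw [hmw]
    exact hst.rbx
  have w_eq : Mem.EqOn Vorbis.L.textLo Vorbis.L.textHi u₀.mem v.mem := hpt.code
  have hdf : v.flags .df = false := (show abiInv _ from hst.inv).1
  have hmx : v.mxcsr &&& 0x1F80 = 0x1F80 := (show abiInv _ from hst.inv).2
  have hsse := Vorbis.sseOK_of_abiInv hst.inv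
  have hgb' := hgb A.2 g.frames' (g.Blk A) g.len
  have hm1 := hG.m1
  have hm2 := hG.m2
  have ha1 := hG.a1
  have ha2 := hG.a2
  have hmp2 := hst.mp2 (by omega)
  have hwS : g.RA - 1888 ≤ (addr g.R - 8).toNat ∧ (addr g.R - 8).toNat + 8 ≤ g.R + 8 := by u_omega
  have hw16 : (g.RA - 1888 ≤ (mw + 16).toNat ∧ (mw + 16).toNat + 1 ≤ g.R + 8) ∨
      (m ≤ (mw + 16).toNat ∧ (mw + 16).toNat + 1 ≤ m + 56) := Or.inr (by u_omega)
  have hptP : ∀ x : Nat, Pt u₀ g i A7 A7c Ai A m (v.mem.writeLE (addr g.R - 8) 8 x) :=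
    fun x => hpt.write _ 8 x (Or.inl hwS)
  have hreP : ∀ x : Nat, RecEq g m v.mem (v.mem.writeLE (addr g.R - 8) 8 x) :=
    fun x => RecEq.push hG _ _ 8 x hwS
  have hpt3 : ∀ x1 x2 x3 : Nat, Pt u₀ g i A7 A7c Ai A m
      (((v.mem.writeLE (addr g.R - 8) 8 x1).writeLE (mw + 16) 1 x2).writeLE (addr g.R - 8) 8 x3) :=
    fun x1 x2 x3 => ((hpt.write _ 8 x1 (Or.inl hwS)).write _ 1 x2 hw16).write _ 8 x3 (Or.inl hwS)
  have h3 : ∀ x1 x2 x3 : Nat,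
      Mapping.chan (((v.mem.writeLE (addr g.R - 8) 8 x1).writeLE (mw + 16) 1 x2).writeLE (addr g.R - 8) 8 x3) m
        = Mapping.chan v.mem m ∧
      Mapping.submaps (((v.mem.writeLE (addr g.R - 8) 8 x1).writeLE (mw + 16) 1 x2).writeLE (addr g.R - 8) 8 x3) m
        = x2 % 2 ^ 8 ∧
      nchan (((v.mem.writeLE (addr g.R - 8) 8 x1).writeLE (mw + 16) 1 x2).writeLE (addr g.R - 8) 8 x3) g.f
        = nchan v.mem g.f := by
    intro x1 x2 x3
    have p1 := RecEq.push hG v.mem _ 8 x1 hwS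
    obtain ⟨s1, s2, _, s4⟩ := store_submaps hG (v.mem.writeLE (addr g.R - 8) 8 x1) mw hmn x2
    have p3 := RecEq.push hG ((v.mem.writeLE (addr g.R - 8) 8 x1).writeLE (mw + 16) 1 x2) _ 8 x3 hwS
    exact ⟨by rw [p3.chan, s1, p1.chan], by rw [p3.submaps, s2], by rw [p3.nch, s4, p1.nch]⟩
  u_walk hcode [hμ.vendor] span [Vorbis.L.textLo, Vorbis.L.textHi] side (v_side)
  case check_116228 =>
    have hun : ShadowUntouched v.mem s_116228.mem := by v_untouched
    exact check_site hpt.shadow hun (hpt.site_rec 16 1 (by omega) (by omega)) (by u_omega)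
  case check_1161b7 =>
    have hun : ShadowUntouched v.mem s_1161b7.mem := by v_untouched
    exact check_site hpt.shadow hun (hpt.site_rec 16 1 (by omega) (by omega)) (by u_omega)
  case call_inv => v_inv
  case pre_1161d1 =>
    have hpt_s : Pt u₀ g i A7 A7c Ai A m s_1161d1.mem := by
      rw [w_mem]
      exact hpt3 _ _ _
    refine ⟨hpt_s.readerPre (by rw [w_rsp]; u_omega) (by rw [w_rdi]; exact hfn), ?_⟩
    rw [bitsArg_def, w_rsi]
    decide
  case call_inv => v_inv
  case pre_1161d1 =>
    have hpt_s : Pt u₀ g i A7 A7c Ai A m s_1161d1.mem := by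
      rw [w_mem]
      exact hpt3 _ _ _
    refine ⟨hpt_s.readerPre (by rw [w_rsp]; u_omega) (by rw [w_rdi]; exact hfn), ?_⟩
    rw [bitsArg_def, w_rsi]
    decide
  case call_inv => v_inv
  case pre_11619d =>
    have hpt_s : Pt u₀ g i A7 A7c Ai A m s_11619d.mem := by
      rw [w_mem]
      exact hptP _
    refine ⟨hpt_s.readerPre (by rw [w_rsp]; u_omega) (by rw [w_rdi]; exact hfn), ?_⟩
    rw [bitsArg_def, w_rsi]
    decide
  case cont =>
    v_after_call w_rsp_1161d1 w_mem_1161d1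
    have c_rdi : (s_1161d1.reg .rdi).toNat = g.f := by
      rw [w_rdi_1161d1]
      exact hfn
    have c_sp : (addr g.R - 8).toNat = g.R - 8 := by u_omega
    simp only [c_rdi, c_sp] at w_same
    have hpost : GetBitsSpecPost (g.Blk A) g.len (s_1161d1.reg .rdi).toNat (bitsArg s_1161d1) s_1161d1 s_1161d1r := w_post
    have hun := hpost.untouched
    have hbits := hpost.bits.bits
    rw [w_mem_1161d1] at hun
    rw [c_rdi] at hbits
    obtain ⟨hpt_r, hkept, hnc⟩ := (hpt3 _ _ _).after_get_bits (sp := g.R - 8) (by omega) (by omega) w_same hun hbits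
    have hre := RecEq.of_kept hkept hnc
    obtain ⟨e1, e2, e3⟩ := h3 1139245 1 1139158
    refine ReachVia.done (Or.inr ⟨A7, A7c, Ai, A, m, ?_⟩)
    exact
      { pt := hpt_r
        rip := w_rip
        rsp := w_rsp
        inv := w_inv
        rbp := by
          rw [w_kept .rbp (by decide), hrbp, hfw]
        rbx := by
          rw [w_kept .rbx (by decide), hrbx, hmw]
        ai := fun h => absurd h (by decide)
        alloc := fun h => absurd h (by decide)
        mp2 := by
          intro _
          rw [hre.chan, hre.nch, e1, e3]
          exact hmp2
        mp3 := by
          intro _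
          rw [hre.submaps, e2]
          decide
        small4 := fun h => absurd h (by decide)
        small8 := fun h => absurd h (by decide) }
  case cont =>
    v_after_call w_rsp_1161d1 w_mem_1161d1
    have c_rdi : (s_1161d1.reg .rdi).toNat = g.f := by
      rw [w_rdi_1161d1]
      exact hfn
    have c_sp : (addr g.R - 8).toNat = g.R - 8 := by u_omega
    simp only [c_rdi, c_sp] at w_same
    have hpost : GetBitsSpecPost (g.Blk A) g.len (s_1161d1.reg .rdi).toNat (bitsArg s_1161d1) s_1161d1 s_1161d1r := w_post
    have hun := hpost.untouched
    have hbits := hpost.bits.bits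
    rw [w_mem_1161d1] at hun
    rw [c_rdi] at hbits
    obtain ⟨hpt_r, hkept, hnc⟩ := (hpt3 _ _ _).after_get_bits (sp := g.R - 8) (by omega) (by omega) w_same hun hbits
    have hre := RecEq.of_kept hkept hnc
    obtain ⟨e1, e2, e3⟩ := h3 1139245 1 1139158
    refine ReachVia.done (Or.inr ⟨A7, A7c, Ai, A, m, ?_⟩)
    exact
      { pt := hpt_r
        rip := w_rip
        rsp := w_rsp
        inv := w_inv
        rbp := by
          rw [w_kept .rbp (by decide), hrbp, hfw]
        rbx := by
          rw [w_kept .rbx (by decide), hrbx, hmw]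
        ai := fun h => absurd h (by decide)
        alloc := fun h => absurd h (by decide)
        mp2 := by
          intro _
          rw [hre.chan, hre.nch, e1, e3]
          exact hmp2
        mp3 := by
          intro _
          rw [hre.submaps, e2]
          decide
        small4 := fun h => absurd h (by decide)
        small8 := fun h => absurd h (by decide) }
  case cont =>
    v_after_call w_rsp_11619d w_mem_11619d
    have c_rdi : (s_11619d.reg .rdi).toNat = g.f := by
      rw [w_rdi_11619d]
      exact hfn
    have c_sp : (addr g.R - 8).toNat = g.R - 8 := by u_omega
    simp only [c_rdi, c_sp] at w_same
    have hpost : GetBitsSpecPost (g.Blk A) g.len (s_11619d.reg .rdi).toNat (bitsArg s_11619d) s_11619d s_11619dr := w_post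
    have hun := hpost.untouched
    have hbits := hpost.bits.bits
    have hres := hpost.bits.result
    rw [w_mem_11619d] at hun
    rw [c_rdi] at hbits
    obtain ⟨hpt_r, hkept, hnc⟩ := (hptP _).after_get_bits (sp := g.R - 8) (by omega) (by omega) w_same hun hbits
    have hre := (hreP 1139106).trans (RecEq.of_kept hkept hnc)
    refine ReachVia.done (Or.inl ⟨A7, A7c, Ai, A, m, ?_⟩)
    exact
      { pt := hpt_r
        rip := w_rip
        rsp := w_rsp
        inv := w_inv
        rbp := by
          rw [w_kept .rbp (by decide), hrbp, hfw]
        rbx := by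
          rw [w_kept .rbx (by decide), hrbx, hmw]
        ai := fun h => absurd h (by decide)
        alloc := fun h => absurd h (by decide)
        mp2 := by
          intro _
          rw [hre.chan, hre.nch]
          exact hmp2
        mp3 := fun h => absurd h (by decide)
        small4 := by
          intro _
          have e : bitsArg s_11619d = 4 := by
            rw [bitsArg_def, w_rsi_11619d]
            decide
          rw [e] at hres
          have := hres.2 (by decide)
          omega
        small8 := fun h => absurd h (by decide) }

/-- The byte `get_bits(f, 4) + 1` stored into `m->submaps` lies in `[1, 16]`. -/
theorem submaps_val (z : Word) (h : z.toNat % 2 ^ 32 < 16) :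
    1 ≤ (BitVec.setWidth 8 (BitVec.setWidth 32 (z + 1).toBitVec)).toNat % 2 ^ 8 ∧
      (BitVec.setWidth 8 (BitVec.setWidth 32 (z + 1).toBitVec)).toNat % 2 ^ 8 ≤ 16 := by
  have hz := z.toNat_lt
  simp only [BitVec.toNat_setWidth, UInt64.toNat_toBitVec, UInt64.toNat_add]
  have e : (1 : UInt64).toNat = 1 := rfl
  rw [e]
  omega

/-- **Leg 4** (0x1161a2 … 0x1161d6): `m->submaps = get_bits(f, 4) + 1 ∈ [1, 16]` (MP3), the load1 check, `max_submaps`, the call of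
the second `get_bits(f, 1)`. -/
theorem leg4 (Lay : Layout) (hLay : Lay.hi = 0x1000000) (μ : Microarch) (hμ : UserX.MicroOK μ) (u₀ : State)
    (hcode : HasCodeNat Lay u₀ Vorbis.L.start_decoder.entry Vorbis.Code.code_start_decoder.nat Vorbis.L.start_decoder.size)
    (hgb : ∀ (others : List Obj) (frames : List (Nat × FrameLayout)) (Blk : Block → Prop) (len : Nat),
      Calls Lay μ Vorbis.WayInv (Vorbis.conv u₀) Vorbis.L.get_bits.entry (Vorbis.Spec.get_bits.spec others frames Blk len))
    (hstore1 : Asan.SmallCheck Lay μ Vorbis.WayInv (Vorbis.CodeOK u₀) [.rax, .rdx] 1 Vorbis.L.__asan_store1_noabort.entry)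
    (hload1 : Asan.SmallCheck Lay μ Vorbis.WayInv (Vorbis.CodeOK u₀) [.rax, .rdx] 1 Vorbis.L.__asan_load1_noabort.entry)
    (g : Ghost) (i : Nat) (v : State) (hat : AtS u₀ g i Vorbis.L.start_decoder.cut285 4 v) :
    ReachVia Lay μ WayInv v (fun w => AtS u₀ g i Vorbis.L.start_decoder.cut286 5 w) := by
  obtain ⟨A7, A7c, Ai, A, m, hst⟩ := hat
  have hpt := hst.pt
  obtain ⟨r1, r8, r2, r3⟩ := hpt.nums
  obtain ⟨f1, f2, f3⟩ := hpt.where_f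
  have hG := hpt.geo
  have hrsp0 := hst.rsp
  have hR : (v.reg .rsp).toNat = g.R := by
    rw [hrsp0, toNat_addr _ (by omega)]
  have hstk : Lay.Has (v.reg .rsp - 408) 1896 := by
    unfold Layout.Has Layout.lo
    rw [hLay]
    u_omega
  obtain ⟨fw, hfw⟩ : ∃ fw : Word, fw = addr g.f := ⟨_, rfl⟩
  have hfn : fw.toNat = g.f := by
    rw [hfw, toNat_addr _ (by omega)]
  obtain ⟨mw, hmw⟩ : ∃ mw : Word, mw = addr m := ⟨_, rfl⟩
  have hmn : mw.toNat = m := by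
    have := hG.m2
    have := hG.a2
    rw [hmw, toNat_addr _ (by omega)]
  have w_rip := hst.rip
  have hrbp : v.reg .rbp = fw := by
    rw [hfw]
    exact hst.rbp
  have hrbx : v.reg .rbx = mw := by
    rw [hmw]
    exact hst.rbx
  have w_eq : Mem.EqOn Vorbis.L.textLo Vorbis.L.textHi u₀.mem v.mem := hpt.code
  have hdf : v.flags .df = false := (show abiInv _ from hst.inv).1
  have hmx : v.mxcsr &&& 0x1F80 = 0x1F80 := (show abiInv _ from hst.inv).2
  have hsse := Vorbis.sseOK_of_abiInv hst.inv
  have hgb' := hgb A.2 g.frames' (g.Blk A) g.len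
  have hm1 := hG.m1
  have hm2 := hG.m2
  have ha1 := hG.a1
  have ha2 := hG.a2
  have hmp2 := hst.mp2 (by omega)
  obtain ⟨z, hrax⟩ : ∃ z : Word, v.reg .rax = z := ⟨_, rfl⟩
  have hsmall := hst.small4 rfl
  rw [hrax] at hsmall
  have hwS : g.RA - 1888 ≤ (addr g.R - 8).toNat ∧ (addr g.R - 8).toNat + 8 ≤ g.R + 8 := by u_omega
  have hw16 : (g.RA - 1888 ≤ (mw + 16).toNat ∧ (mw + 16).toNat + 1 ≤ g.R + 8) ∨
      (m ≤ (mw + 16).toNat ∧ (mw + 16).toNat + 1 ≤ m + 56) := Or.inr (by u_omega)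
  have hptP : ∀ x : Nat, Pt u₀ g i A7 A7c Ai A m (v.mem.writeLE (addr g.R - 8) 8 x) :=
    fun x => hpt.write _ 8 x (Or.inl hwS)
  have hreP : ∀ x : Nat, RecEq g m v.mem (v.mem.writeLE (addr g.R - 8) 8 x) :=
    fun x => RecEq.push hG _ _ 8 x hwS
  have hpt3 : ∀ x1 x2 x3 : Nat, Pt u₀ g i A7 A7c Ai A m
      (((v.mem.writeLE (addr g.R - 8) 8 x1).writeLE (mw + 16) 1 x2).writeLE (addr g.R - 8) 8 x3) :=
    fun x1 x2 x3 => ((hpt.write _ 8 x1 (Or.inl hwS)).write _ 1 x2 hw16).write _ 8 x3 (Or.inl hwS)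
  have h3 : ∀ x1 x2 x3 : Nat,
      Mapping.chan (((v.mem.writeLE (addr g.R - 8) 8 x1).writeLE (mw + 16) 1 x2).writeLE (addr g.R - 8) 8 x3) m
        = Mapping.chan v.mem m ∧
      Mapping.submaps (((v.mem.writeLE (addr g.R - 8) 8 x1).writeLE (mw + 16) 1 x2).writeLE (addr g.R - 8) 8 x3) m
        = x2 % 2 ^ 8 ∧
      nchan (((v.mem.writeLE (addr g.R - 8) 8 x1).writeLE (mw + 16) 1 x2).writeLE (addr g.R - 8) 8 x3) g.f
        = nchan v.mem g.f := by
    intro x1 x2 x3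
    have p1 := RecEq.push hG v.mem _ 8 x1 hwS
    obtain ⟨s1, s2, _, s4⟩ := store_submaps hG (v.mem.writeLE (addr g.R - 8) 8 x1) mw hmn x2
    have p3 := RecEq.push hG ((v.mem.writeLE (addr g.R - 8) 8 x1).writeLE (mw + 16) 1 x2) _ 8 x3 hwS
    exact ⟨by rw [p3.chan, s1, p1.chan], by rw [p3.submaps, s2], by rw [p3.nch, s4, p1.nch]⟩
  u_walk hcode [hμ.vendor] span [Vorbis.L.textLo, Vorbis.L.textHi] side (v_side)
  case check_1161aa =>
    have hun : ShadowUntouched v.mem s_1161aa.mem := by v_untouched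
    exact check_site hpt.shadow hun (hpt.site_rec 16 1 (by omega) (by omega)) (by u_omega)
  case check_1161b7 =>
    have hun : ShadowUntouched v.mem s_1161b7.mem := by v_untouched
    exact check_site hpt.shadow hun (hpt.site_rec 16 1 (by omega) (by omega)) (by u_omega)
  case call_inv => v_inv
  case pre_1161d1 =>
    have hpt_s : Pt u₀ g i A7 A7c Ai A m s_1161d1.mem := by
      rw [w_mem]
      exact hpt3 _ _ _
    refine ⟨hpt_s.readerPre (by rw [w_rsp]; u_omega) (by rw [w_rdi]; exact hfn), ?_⟩
    rw [bitsArg_def, w_rsi]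
    decide
  case call_inv => v_inv
  case pre_1161d1 =>
    have hpt_s : Pt u₀ g i A7 A7c Ai A m s_1161d1.mem := by
      rw [w_mem]
      exact hpt3 _ _ _
    refine ⟨hpt_s.readerPre (by rw [w_rsp]; u_omega) (by rw [w_rdi]; exact hfn), ?_⟩
    rw [bitsArg_def, w_rsi]
    decide
  case cont =>
    v_after_call w_rsp_1161d1 w_mem_1161d1
    have c_rdi : (s_1161d1.reg .rdi).toNat = g.f := by
      rw [w_rdi_1161d1]
      exact hfn
    have c_sp : (addr g.R - 8).toNat = g.R - 8 := by u_omega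
    simp only [c_rdi, c_sp] at w_same
    have hpost : GetBitsSpecPost (g.Blk A) g.len (s_1161d1.reg .rdi).toNat (bitsArg s_1161d1) s_1161d1 s_1161d1r := w_post
    have hun := hpost.untouched
    have hbits := hpost.bits.bits
    rw [w_mem_1161d1] at hun
    rw [c_rdi] at hbits
    obtain ⟨hpt_r, hkept, hnc⟩ := (hpt3 _ _ _).after_get_bits (sp := g.R - 8) (by omega) (by omega) w_same hun hbits
    have hre := RecEq.of_kept hkept hnc
    obtain ⟨e1, e2, e3⟩ := h3 1139119 (BitVec.setWidth 8 (BitVec.setWidth 32 (z + 1).toBitVec)).toNat 1139158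
    refine ReachVia.done ⟨A7, A7c, Ai, A, m, ?_⟩
    exact
      { pt := hpt_r
        rip := w_rip
        rsp := w_rsp
        inv := w_inv
        rbp := by
          rw [w_kept .rbp (by decide), hrbp, hfw]
        rbx := by
          rw [w_kept .rbx (by decide), hrbx, hmw]
        ai := fun h => absurd h (by decide)
        alloc := fun h => absurd h (by decide)
        mp2 := by
          intro _
          rw [hre.chan, hre.nch, e1, e3]
          exact hmp2
        mp3 := by
          intro _
          rw [hre.submaps, e2]
          exact submaps_val z hsmall
        small4 := fun h => absurd h (by decide)
        small8 := fun h => absurd h (by decide) }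
  case cont =>
    v_after_call w_rsp_1161d1 w_mem_1161d1
    have c_rdi : (s_1161d1.reg .rdi).toNat = g.f := by
      rw [w_rdi_1161d1]
      exact hfn
    have c_sp : (addr g.R - 8).toNat = g.R - 8 := by u_omega
    simp only [c_rdi, c_sp] at w_same
    have hpost : GetBitsSpecPost (g.Blk A) g.len (s_1161d1.reg .rdi).toNat (bitsArg s_1161d1) s_1161d1 s_1161d1r := w_post
    have hun := hpost.untouched
    have hbits := hpost.bits.bits
    rw [w_mem_1161d1] at hun
    rw [c_rdi] at hbits
    obtain ⟨hpt_r, hkept, hnc⟩ := (hpt3 _ _ _).after_get_bits (sp := g.R - 8) (by omega) (by omega) w_same hun hbits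
    have hre := RecEq.of_kept hkept hnc
    obtain ⟨e1, e2, e3⟩ := h3 1139119 (BitVec.setWidth 8 (BitVec.setWidth 32 (z + 1).toBitVec)).toNat 1139158
    refine ReachVia.done ⟨A7, A7c, Ai, A, m, ?_⟩
    exact
      { pt := hpt_r
        rip := w_rip
        rsp := w_rsp
        inv := w_inv
        rbp := by
          rw [w_kept .rbp (by decide), hrbp, hfw]
        rbx := by
          rw [w_kept .rbx (by decide), hrbx, hmw]
        ai := fun h => absurd h (by decide)
        alloc := fun h => absurd h (by decide)
        mp2 := by
          intro _
          rw [hre.chan, hre.nch, e1, e3]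
          exact hmp2
        mp3 := by
          intro _
          rw [hre.submaps, e2]
          exact submaps_val z hsmall
        small4 := fun h => absurd h (by decide)
        small8 := fun h => absurd h (by decide) }

/-- **Leg 5** (0x1161d6 … 0x1161eb or the exit 0x11635d): `get_bits(f, 1) = 0` → `m->coupling_steps = 0` (0x116387) → R11; else the
call of `get_bits(f, 8)`. -/
theorem leg5 (Lay : Layout) (hLay : Lay.hi = 0x1000000) (μ : Microarch) (hμ : UserX.MicroOK μ) (u₀ : State)
    (hcode : HasCodeNat Lay u₀ Vorbis.L.start_decoder.entry Vorbis.Code.code_start_decoder.nat Vorbis.L.start_decoder.size)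
    (hgb : ∀ (others : List Obj) (frames : List (Nat × FrameLayout)) (Blk : Block → Prop) (len : Nat),
      Calls Lay μ Vorbis.WayInv (Vorbis.conv u₀) Vorbis.L.get_bits.entry (Vorbis.Spec.get_bits.spec others frames Blk len))
    (hstore2 : Asan.SmallCheck Lay μ Vorbis.WayInv (Vorbis.CodeOK u₀) [.rax, .rcx, .rdx] 2 Vorbis.L.__asan_store2_noabort.entry)
    (g : Ghost) (i : Nat) (v : State) (hat : AtS u₀ g i Vorbis.L.start_decoder.cut286 5 v) :
    ReachVia Lay μ WayInv v (fun w => AtS u₀ g i Vorbis.L.start_decoder.cut287 6 w ∨ AtR11 u₀ g i w) := by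
  obtain ⟨A7, A7c, Ai, A, m, hst⟩ := hat
  have hpt := hst.pt
  obtain ⟨r1, r8, r2, r3⟩ := hpt.nums
  obtain ⟨f1, f2, f3⟩ := hpt.where_f
  have hG := hpt.geo
  have hrsp0 := hst.rsp
  have hR : (v.reg .rsp).toNat = g.R := by
    rw [hrsp0, toNat_addr _ (by omega)]
  have hstk : Lay.Has (v.reg .rsp - 408) 1896 := by
    unfold Layout.Has Layout.lo
    rw [hLay]
    u_omega
  obtain ⟨fw, hfw⟩ : ∃ fw : Word, fw = addr g.f := ⟨_, rfl⟩
  have hfn : fw.toNat = g.f := by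
    rw [hfw, toNat_addr _ (by omega)]
  obtain ⟨mw, hmw⟩ : ∃ mw : Word, mw = addr m := ⟨_, rfl⟩
  have hmn : mw.toNat = m := by
    have := hG.m2
    have := hG.a2
    rw [hmw, toNat_addr _ (by omega)]
  have w_rip := hst.rip
  have hrbp : v.reg .rbp = fw := by
    rw [hfw]
    exact hst.rbp
  have hrbx : v.reg .rbx = mw := by
    rw [hmw]
    exact hst.rbx
  have w_eq : Mem.EqOn Vorbis.L.textLo Vorbis.L.textHi u₀.mem v.mem := hpt.code
  have hdf : v.flags .df = false := (show abiInv _ from hst.inv).1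
  have hmx : v.mxcsr &&& 0x1F80 = 0x1F80 := (show abiInv _ from hst.inv).2
  have hsse := Vorbis.sseOK_of_abiInv hst.inv
  have hgb' := hgb A.2 g.frames' (g.Blk A) g.len
  have hm1 := hG.m1
  have hm2 := hG.m2
  have ha1 := hG.a1
  have ha2 := hG.a2
  have hmp2 := hst.mp2 (by omega)
  have hmp3 := hst.mp3 (by omega)
  have hwS : g.RA - 1888 ≤ (addr g.R - 8).toNat ∧ (addr g.R - 8).toNat + 8 ≤ g.R + 8 := by u_omega
  have hw0 : (g.RA - 1888 ≤ mw.toNat ∧ mw.toNat + 2 ≤ g.R + 8) ∨ (m ≤ mw.toNat ∧ mw.toNat + 2 ≤ m + 56) :=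
    Or.inr (by u_omega)
  have hptP : ∀ x : Nat, Pt u₀ g i A7 A7c Ai A m (v.mem.writeLE (addr g.R - 8) 8 x) :=
    fun x => hpt.write _ 8 x (Or.inl hwS)
  have hreP : ∀ x : Nat, RecEq g m v.mem (v.mem.writeLE (addr g.R - 8) 8 x) :=
    fun x => RecEq.push hG _ _ 8 x hwS
  u_walk hcode [hμ.vendor] until [Vorbis.L.start_decoder.cut297] span [Vorbis.L.textLo, Vorbis.L.textHi] side (v_side)
  case check_11638a =>
    have hun : ShadowUntouched v.mem s_11638a.mem := by v_untouched
    exact check_site hpt.shadow hun (hpt.site_rec 0 2 (by omega) (by omega)) (by u_omega)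
  case call_inv => v_inv
  case pre_1161e6 =>
    have hpt_s : Pt u₀ g i A7 A7c Ai A m s_1161e6.mem := by
      rw [w_mem]
      exact hptP _
    refine ⟨hpt_s.readerPre (by rw [w_rsp]; u_omega) (by rw [w_rdi]; exact hfn), ?_⟩
    rw [bitsArg_def, w_rsi]
    decide
  case cont =>
    -- 0x11635d: the exit to R11 with `coupling_steps = 0`
    have hpt_w : Pt u₀ g i A7 A7c Ai A m s_116394.mem := by
      rw [w_mem]
      exact (hptP _).write _ 2 0 hw0
    obtain ⟨s1, s2, s3, s4⟩ := store_steps hG (v.mem.writeLE (addr g.R - 8) 8 1139599) mw hmn 0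
    have hre := hreP 1139599
    have hinv : abiInv s_116394 := by
      refine Vorbis.abiInv_of ?_ ?_
      · rw [w_flags]
        exact w_df_11638a
      · rw [w_mxcsr]
        exact hmx
    have hrsp' : s_116394.reg .rsp = addr g.R := w_rsp
    have hrbp' : s_116394.reg .rbp = addr g.f := by
      rw [w_kept .rbp (by decide), hrbp, hfw]
    have hrbx' : s_116394.reg .rbx = addr m := by
      rw [w_kept .rbx (by decide), hrbx, hmw]
    have hHD := hpt_w.mid.header.HD1
    refine ReachVia.done (Or.inr ⟨A7, A7c, Ai, A, ?_⟩)
    refine ⟨hpt_w.loop pc_R11 w_rip hrsp' hinv hrbp', ?_, ?_⟩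
    · rw [hpt_w.recAt]
      exact hrbx'
    · rw [← w_mem] at s1 s2 s3 s4
      have hrec := hpt_w.recAt
      exact
        { lt := hpt_w.lt
          MP2 := by
            rw [hrec, s1, s4, hre.chan, hre.nch]
            exact hmp2
          MP3 := by
            rw [hrec, s2, hre.submaps]
            exact hmp3
          MP4_steps := by
            rw [hrec, s3]
            omega
          steps_pos := fun h => absurd h (by decide)
          MP4 := by
            intro _ k hk
            rw [hrec, s3] at hk
            exact absurd hk (by omega)
          MP5 := fun h => absurd h (by decide) }
  case cont =>
    v_after_call w_rsp_1161e6 w_mem_1161e6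
    have c_rdi : (s_1161e6.reg .rdi).toNat = g.f := by
      rw [w_rdi_1161e6]
      exact hfn
    have c_sp : (addr g.R - 8).toNat = g.R - 8 := by u_omega
    simp only [c_rdi, c_sp] at w_same
    have hpost : GetBitsSpecPost (g.Blk A) g.len (s_1161e6.reg .rdi).toNat (bitsArg s_1161e6) s_1161e6 s_1161e6r := w_post
    have hun := hpost.untouched
    have hbits := hpost.bits.bits
    have hres := hpost.bits.result
    rw [w_mem_1161e6] at hun
    rw [c_rdi] at hbits
    obtain ⟨hpt_r, hkept, hnc⟩ := (hptP _).after_get_bits (sp := g.R - 8) (by omega) (by omega) w_same hun hbits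
    have hre := (hreP 1139179).trans (RecEq.of_kept hkept hnc)
    refine ReachVia.done (Or.inl ⟨A7, A7c, Ai, A, m, ?_⟩)
    exact
      { pt := hpt_r
        rip := w_rip
        rsp := w_rsp
        inv := w_inv
        rbp := by
          rw [w_kept .rbp (by decide), hrbp, hfw]
        rbx := by
          rw [w_kept .rbx (by decide), hrbx, hmw]
        ai := fun h => absurd h (by decide)
        alloc := fun h => absurd h (by decide)
        mp2 := by
          intro _
          rw [hre.chan, hre.nch]
          exact hmp2
        mp3 := by
          intro _
          rw [hre.submaps]
          exact hmp3
        small4 := fun h => absurd h (by decide)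
        small8 := by
          intro _
          have e : bitsArg s_1161e6 = 8 := by
            rw [bitsArg_def, w_rsi_1161e6]
            decide
          rw [e] at hres
          have := hres.2 (by decide)
          omega }

/-- The word `get_bits(f, 8) + 1` stored into `m->coupling_steps` is at least 1. -/
theorem steps_val (z : Word) (h : z.toNat % 2 ^ 32 < 256) :
    1 ≤ (BitVec.setWidth 16 (BitVec.setWidth 32 (z + 1).toBitVec)).toNat % 2 ^ 16 := by
  have hz := z.toNat_lt
  simp only [BitVec.toNat_setWidth, UInt64.toNat_toBitVec, UInt64.toNat_add]
  have e : (1 : UInt64).toNat = 1 := rfl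
  rw [e]
  omega

/-- The signed comparison `coupling_steps > f->channels` of line 4109, as numbers. -/
theorem steps_cmp (x : BitVec 16) (C : Nat) (hC : C ≤ 16) :
    ((BitVec.zeroExtend 32 x).toInt ≤ (BitVec.ofNat 32 C).toInt) ↔ x.toNat ≤ C := by
  have hx := x.isLt
  have e1 : (BitVec.zeroExtend 32 x).toInt = x.toNat := by
    rw [BitVec.toInt_eq_toNat_of_lt]
    · simp only [BitVec.toNat_setWidth]
      omega
    · simp only [BitVec.toNat_setWidth]
      omega
  have e2 : (BitVec.ofNat 32 C).toInt = C := by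
    rw [BitVec.toInt_eq_toNat_of_lt]
    · simp only [BitVec.toNat_ofNat]
      omega
    · simp only [BitVec.toNat_ofNat]
      omega
  rw [e1, e2]
  omega

/-- **Leg 6** (0x1161eb … the exits 0x116380 / 0x113b22): `m->coupling_steps = get_bits(f, 8) + 1`, the load4 check of
`f->channels`, the signed comparison: `≤` → R10 with `1 ≤ coupling_steps ≤ channels`; else `error` → the epilogue. -/
theorem leg6 (Lay : Layout) (hLay : Lay.hi = 0x1000000) (μ : Microarch) (hμ : UserX.MicroOK μ) (u₀ : State)
    (hcode : HasCodeNat Lay u₀ Vorbis.L.start_decoder.entry Vorbis.Code.code_start_decoder.nat Vorbis.L.start_decoder.size)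
    (herr : ∀ (others : List Obj) (frames : List (Nat × FrameLayout)),
      Calls Lay μ Vorbis.WayInv (Vorbis.conv u₀) Vorbis.L.error.entry (Vorbis.Spec.error.spec others frames))
    (hload4 : Asan.SmallCheck Lay μ Vorbis.WayInv (Vorbis.CodeOK u₀) [.rax, .rcx, .rdx] 4 Vorbis.L.__asan_load4_noabort.entry)
    (hstore2 : Asan.SmallCheck Lay μ Vorbis.WayInv (Vorbis.CodeOK u₀) [.rax, .rcx, .rdx] 2 Vorbis.L.__asan_store2_noabort.entry)
    (g : Ghost) (i : Nat) (v : State) (hat : AtS u₀ g i Vorbis.L.start_decoder.cut287 6 v) :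
    ReachVia Lay μ WayInv v (fun w => AtR10 u₀ g i w ∨ AtERR u₀ g w) := by
  obtain ⟨A7, A7c, Ai, A, m, hst⟩ := hat
  have hpt := hst.pt
  obtain ⟨r1, r8, r2, r3⟩ := hpt.nums
  obtain ⟨f1, f2, f3⟩ := hpt.where_f
  have hG := hpt.geo
  have hrsp0 := hst.rsp
  have hR : (v.reg .rsp).toNat = g.R := by
    rw [hrsp0, toNat_addr _ (by omega)]
  have hstk : Lay.Has (v.reg .rsp - 408) 1896 := by
    unfold Layout.Has Layout.lo
    rw [hLay]
    u_omega
  obtain ⟨fw, hfw⟩ : ∃ fw : Word, fw = addr g.f := ⟨_, rfl⟩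
  have hfn : fw.toNat = g.f := by
    rw [hfw, toNat_addr _ (by omega)]
  obtain ⟨mw, hmw⟩ : ∃ mw : Word, mw = addr m := ⟨_, rfl⟩
  have hmn : mw.toNat = m := by
    have := hG.m2
    have := hG.a2
    rw [hmw, toNat_addr _ (by omega)]
  have w_rip := hst.rip
  have hrbp : v.reg .rbp = fw := by
    rw [hfw]
    exact hst.rbp
  have hrbx : v.reg .rbx = mw := by
    rw [hmw]
    exact hst.rbx
  have w_eq : Mem.EqOn Vorbis.L.textLo Vorbis.L.textHi u₀.mem v.mem := hpt.code
  have hdf : v.flags .df = false := (show abiInv _ from hst.inv).1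
  have hmx : v.mxcsr &&& 0x1F80 = 0x1F80 := (show abiInv _ from hst.inv).2
  have hsse := Vorbis.sseOK_of_abiInv hst.inv
  have herr' := herr A.2 g.frames'
  have hm1 := hG.m1
  have hm2 := hG.m2
  have ha1 := hG.a1
  have ha2 := hG.a2
  have hmp2 := hst.mp2 (by omega)
  have hmp3 := hst.mp3 (by omega)
  obtain ⟨z, hrax⟩ : ∃ z : Word, v.reg .rax = z := ⟨_, rfl⟩
  have hsmall := hst.small8 rfl
  rw [hrax] at hsmall
  obtain ⟨C, hC⟩ : ∃ C : Nat, nchan v.mem g.f = C := ⟨_, rfl⟩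
  have hC16 : 1 ≤ C ∧ C ≤ 16 := by
    have := hpt.mid.header.HD1
    rw [← hC, nchan_def]
    omega
  have ld4 : v.mem.readLE (fw + 4) 4 = C := by
    have h1 := hpt.mid.header.HD1
    rw [hfw, ← hC, nchan_def]
    simp only [vfield]
    have := Mem.u32_of_i32_nonneg v.mem (g.f + 4) (by simp only [vacc, voff] at h1; omega)
    rw [this]
    simp only [vacc, voff]
  have hwS : g.RA - 1888 ≤ (addr g.R - 8).toNat ∧ (addr g.R - 8).toNat + 8 ≤ g.R + 8 := by u_omega
  have hw0 : (g.RA - 1888 ≤ mw.toNat ∧ mw.toNat + 2 ≤ g.R + 8) ∨ (m ≤ mw.toNat ∧ mw.toNat + 2 ≤ m + 56) :=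
    Or.inr (by u_omega)
  have hptP : ∀ x : Nat, Pt u₀ g i A7 A7c Ai A m (v.mem.writeLE (addr g.R - 8) 8 x) :=
    fun x => hpt.write _ 8 x (Or.inl hwS)
  have hpt3 : ∀ x1 x2 x3 : Nat, Pt u₀ g i A7 A7c Ai A m
      (((v.mem.writeLE (addr g.R - 8) 8 x1).writeLE mw 2 x2).writeLE (addr g.R - 8) 8 x3) :=
    fun x1 x2 x3 => ((hpt.write _ 8 x1 (Or.inl hwS)).write _ 2 x2 hw0).write _ 8 x3 (Or.inl hwS)
  have h2 : ∀ x1 x2 : Nat,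
      nchan ((v.mem.writeLE (addr g.R - 8) 8 x1).writeLE mw 2 x2) g.f = nchan v.mem g.f := by
    intro x1 x2
    have p1 := RecEq.push hG v.mem _ 8 x1 hwS
    obtain ⟨_, _, _, s4⟩ := store_steps hG (v.mem.writeLE (addr g.R - 8) 8 x1) mw hmn x2
    rw [s4, p1.nch]
  have h3 : ∀ x1 x2 x3 : Nat,
      Mapping.chan (((v.mem.writeLE (addr g.R - 8) 8 x1).writeLE mw 2 x2).writeLE (addr g.R - 8) 8 x3) m
        = Mapping.chan v.mem m ∧
      Mapping.submaps (((v.mem.writeLE (addr g.R - 8) 8 x1).writeLE mw 2 x2).writeLE (addr g.R - 8) 8 x3) m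
        = Mapping.submaps v.mem m ∧
      Mapping.coupling_steps (((v.mem.writeLE (addr g.R - 8) 8 x1).writeLE mw 2 x2).writeLE (addr g.R - 8) 8 x3) m
        = x2 % 2 ^ 16 ∧
      nchan (((v.mem.writeLE (addr g.R - 8) 8 x1).writeLE mw 2 x2).writeLE (addr g.R - 8) 8 x3) g.f
        = nchan v.mem g.f := by
    intro x1 x2 x3
    have p1 := RecEq.push hG v.mem _ 8 x1 hwS
    obtain ⟨s1, s2, s3, s4⟩ := store_steps hG (v.mem.writeLE (addr g.R - 8) 8 x1) mw hmn x2
    have p3 := RecEq.push hG ((v.mem.writeLE (addr g.R - 8) 8 x1).writeLE mw 2 x2) _ 8 x3 hwS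
    exact ⟨by rw [p3.chan, s1, p1.chan], by rw [p3.submaps, s2, p1.submaps], by rw [p3.steps, s3],
      by rw [p3.nch, s4, p1.nch]⟩
  -- the load of `f->channels` through the two stores
  have hld : ∀ x1 x2 : Nat, ((v.mem.writeLE (addr g.R - 8) 8 x1).writeLE mw 2 x2).readLE (fw + 4) 4 = C := by
    intro x1 x2
    have hn := h2 x1 x2
    have h1 := (hptP x1).write _ 2 x2 hw0
    have hHD := h1.mid.header.HD1
    rw [hfw]
    simp only [vfield]
    rw [Mem.u32_of_i32_nonneg _ (g.f + 4) (by simp only [vacc, voff] at hHD; omega)]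
    rw [hC, nchan_def] at hn
    simp only [vacc, voff] at hn
    exact hn
  u_walk hcode [hμ.vendor] until [Vorbis.L.start_decoder.cut300, Vorbis.L.start_decoder.cut4] span [Vorbis.L.textLo, Vorbis.L.textHi] side (v_side)
  case check_1161f2 =>
    have hun : ShadowUntouched v.mem s_1161f2.mem := by v_untouched
    exact check_site hpt.shadow hun (hpt.site_rec 0 2 (by omega) (by omega)) (by u_omega)
  case check_116203 =>
    have hun : ShadowUntouched v.mem s_116203.mem := by v_untouched
    exact hpt.objLive.accSmall hpt.shadow hun _ 4 (by decide) (by u_omega) (by simp only [Off.sizeof.stb_vorbis]; u_omega)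
  case call_inv => v_inv
  case pre_11621a =>
    have hpt_s : Pt u₀ g i A7 A7c Ai A m s_11621a.mem := by
      rw [w_mem]
      exact hpt3 _ _ _
    exact hpt_s.errorPre (by rw [w_rsp]; u_omega) (by rw [w_rdi]; exact hfn)
  case cont =>
    -- 0x116380: the exit to R10 with `1 ≤ coupling_steps ≤ channels`
    have hpt_w : Pt u₀ g i A7 A7c Ai A m s_11620c.mem := by
      rw [w_mem]
      exact hpt3 _ _ _
    obtain ⟨s1, s2, s3, s4⟩ := h3 1139191 (BitVec.setWidth 16 (BitVec.setWidth 32 (z + 1).toBitVec)).toNat 1139208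
    rw [← w_mem] at s1 s2 s3 s4
    rw [hld, steps_cmp _ C (by omega)] at hbr_11620c
    have hinv : abiInv s_11620c := by
      refine Vorbis.abiInv_of ?_ ?_
      · rw [w_flags]
        simp only [X86.User.df_setStatus]
        exact w_df_116203
      · rw [w_mxcsr]
        exact hmx
    have hrbp' : s_11620c.reg .rbp = addr g.f := by
      rw [w_kept .rbp (by decide), hrbp, hfw]
    have hrbx' : s_11620c.reg .rbx = addr m := by
      rw [w_kept .rbx (by decide), hrbx, hmw]
    have hHD := hpt_w.mid.header.HD1
    have hrec := hpt_w.recAt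
    have hsv := steps_val z hsmall
    have hx16 := (BitVec.setWidth 16 (BitVec.setWidth 32 (z + 1).toBitVec)).isLt
    refine ReachVia.done (Or.inl ⟨A7, A7c, Ai, A, ?_⟩)
    refine ⟨hpt_w.loop pc_R10 w_rip w_rsp hinv hrbp', ?_, ?_⟩
    · rw [hrec]
      exact hrbx'
    · exact
        { lt := hpt_w.lt
          MP2 := by
            rw [hrec, s1, s4]
            exact hmp2
          MP3 := by
            rw [hrec, s2]
            exact hmp3
          MP4_steps := by
            rw [hrec, s3]
            rw [hC, nchan_def] at s4
            omega
          steps_pos := by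
            intro _
            rw [hrec, s3]
            exact hsv
          MP4 := fun h => absurd h (by decide)
          MP5 := fun h => absurd h (by decide) }
  case cont =>
    v_after_call w_rsp_11621a w_mem_11621a
    have c_rdi : (s_11621a.reg .rdi).toNat = g.f := by
      rw [w_rdi_11621a]
      exact hfn
    have c_sp : (addr g.R - 8).toNat = g.R - 8 := by u_omega
    simp only [c_rdi, c_sp] at w_same
    obtain ⟨hrax', hun, _⟩ := w_post
    rw [w_mem_11621a] at hun
    have hpt_r := (hpt3 _ _ _).after_error (sp := g.R - 8) (by omega) (by omega) w_same hun
    u_walk hcode [hμ.vendor] until [Vorbis.L.start_decoder.cut300, Vorbis.L.start_decoder.cut4] span [Vorbis.L.textLo, Vorbis.L.textHi] side (v_side)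
    refine ReachVia.done (Or.inr (St.toERR (by rw [w_mem]; exact hpt_r) w_rip w_rsp (by v_inv) w_rax))

/-- **The tail of the segment from the return of the second `get_bits(f, 1)`** (legs 5 and 6 chained). -/
theorem tail5 (Lay : Layout) (hLay : Lay.hi = 0x1000000) (μ : Microarch) (hμ : UserX.MicroOK μ) (u₀ : State)
    (hcode : HasCodeNat Lay u₀ Vorbis.L.start_decoder.entry Vorbis.Code.code_start_decoder.nat Vorbis.L.start_decoder.size)
    (hgb : ∀ (others : List Obj) (frames : List (Nat × FrameLayout)) (Blk : Block → Prop) (len : Nat),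
      Calls Lay μ Vorbis.WayInv (Vorbis.conv u₀) Vorbis.L.get_bits.entry (Vorbis.Spec.get_bits.spec others frames Blk len))
    (herr : ∀ (others : List Obj) (frames : List (Nat × FrameLayout)),
      Calls Lay μ Vorbis.WayInv (Vorbis.conv u₀) Vorbis.L.error.entry (Vorbis.Spec.error.spec others frames))
    (hload4 : Asan.SmallCheck Lay μ Vorbis.WayInv (Vorbis.CodeOK u₀) [.rax, .rcx, .rdx] 4 Vorbis.L.__asan_load4_noabort.entry)
    (hstore2 : Asan.SmallCheck Lay μ Vorbis.WayInv (Vorbis.CodeOK u₀) [.rax, .rcx, .rdx] 2 Vorbis.L.__asan_store2_noabort.entry)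
    (g : Ghost) (i : Nat) (v : State) (hat : AtS u₀ g i Vorbis.L.start_decoder.cut286 5 v) :
    ReachVia Lay μ WayInv v (fun w => AtR10 u₀ g i w ∨ AtR11 u₀ g i w ∨ AtERR u₀ g w) := by
  refine (leg5 Lay hLay μ hμ u₀ hcode hgb hstore2 g i v hat).trans ?_
  intro v6 h6
  rcases h6 with h6 | h11
  · refine (leg6 Lay hLay μ hμ u₀ hcode herr hload4 hstore2 g i v6 h6).mono ?_
    intro w hw
    rcases hw with h10 | he
    · exact Or.inl h10
    · exact Or.inr (Or.inr he)
  · exact ReachVia.done (Or.inr (Or.inl h11))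

end Vorbis.Spec.start_decoder_R9

/-- Segment R9 of `start_decoder` (0x116105 … 0x116231, 0x116387 … 0x116394): the seven legs between the call returns, chained. -/
theorem Vorbis.Spec.Worked.start_decoder_R9_ok : Vorbis.Spec.start_decoder_R9.Statement := by
  unfold Vorbis.Spec.start_decoder_R9.Statement
  intro Lay hLay μ hμ u₀ hcode hload8 hgb herr hload4 hsm hstore8 hstore1 hload1 hstore2
  intro g i v hat
  -- 0x116105 … 0x11612e
  refine (Vorbis.Spec.start_decoder_R9.leg0 Lay hLay μ hμ u₀ hcode hload8 hgb g i v hat).trans ?_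
  intro v1 h1
  -- 0x11612e … 0x116159
  refine (Vorbis.Spec.start_decoder_R9.leg1 Lay hLay μ hμ u₀ hcode herr hload4 hsm g i v1 h1).trans ?_
  intro v2 h2
  rcases h2 with h2 | he
  · -- 0x116159 … 0x11618d
    refine (Vorbis.Spec.start_decoder_R9.leg2 Lay hLay μ hμ u₀ hcode hgb herr hstore8 g i v2 h2).trans ?_
    intro v3 h3
    rcases h3 with h3 | he
    · -- 0x11618d … 0x1161a2 / 0x1161d6
      refine (Vorbis.Spec.start_decoder_R9.leg3 Lay hLay μ hμ u₀ hcode hgb hstore1 hload1 g i v3 h3).trans ?_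
      intro v4 h4
      rcases h4 with h4 | h5
      · -- 0x1161a2 … 0x1161d6
        refine (Vorbis.Spec.start_decoder_R9.leg4 Lay hLay μ hμ u₀ hcode hgb hstore1 hload1 g i v4 h4).trans ?_
        intro v5 h5
        exact Vorbis.Spec.start_decoder_R9.tail5 Lay hLay μ hμ u₀ hcode hgb herr hload4 hstore2 g i v5 h5
      · exact Vorbis.Spec.start_decoder_R9.tail5 Lay hLay μ hμ u₀ hcode hgb herr hload4 hstore2 g i v4 h5
    · exact X86.User.ReachVia.done (Or.inr (Or.inr he))
  · exact X86.User.ReachVia.done (Or.inr (Or.inr he))
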